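-- pv_equiv track=rewrite | github.com/AmanPandita/Algorithms-and-Data-Structures | quiz3/quiz3.py | max_dogs
-- ===== SOURCE A (Python) =====
-- def max_dogs(hunger_levels, biscuit_sizes):
--     # Sort the hunger levels and biscuit sizes in ascending order
--     hunger_levels.sort()
--     biscuit_sizes.sort()
--
--
--     # Initialize number of satisfied dogs count to 0
--     no_of_dogs = 0
--
--     # Initialize the index of the current biscuit
--     current_biscuit = 0
--
--
--     # Iterate through the hunger levels
--     for hunger in hunger_levels:
--
--         # Find a suitable biscuit for the current dog
--
--         while current_biscuit < len(biscuit_sizes) and biscuit_sizes[current_biscuit] < hunger: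
--             current_biscuit += 1  # Move to the next larger biscuit
--
--         # Check if a suitable biscuit was found
--         if current_biscuit < len(biscuit_sizes):
--             no_of_dogs += 1  # Satisfy the current dog
--             current_biscuit += 1  # Use this biscuit and move to the next
--
--     return no_of_dogs
-- ===== SOURCE B (Python) =====
-- def max_dogs(hunger_levels, biscuit_sizes):
--     # Same in-place sorts as the original (the mutation is part of the behaviour)
--     hunger_levels.sort()
--     biscuit_sizes.sort()
--     n, m = len(hunger_levels), len(biscuit_sizes)
--
--     # Feasibility check: can k dogs be satisfied at all?  Exactly when the k
--     # smallest hunger levels fit under the k largest biscuits, pairwise in order.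
--     def feasible(k):
--         return all(hunger_levels[i] <= biscuit_sizes[m - k + i] for i in range(k))
--
--     # feasible is monotone (k satisfiable => k-1 satisfiable), so binary-search
--     # for the largest feasible k instead of greedily assigning biscuits.
--     lo, hi = 0, min(n, m)
--     while lo < hi:
--         mid = (lo + hi + 1) // 2
--         if feasible(mid):
--             lo = mid
--         else:
--             hi = mid - 1
--     return lo
-- ===== Notes on version B (the rewrite author's own statement) =====
-- stated objective: alternative
-- what changed: Replaces A's greedy biscuit-assignment scan by a binary search over the answer k, using the order-theoretic feasibility test that the k smallest hunger levels fit pairwise under the k largest biscuit sizes; no greedy pointer or assignment loop remains.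
import Mathlib
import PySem

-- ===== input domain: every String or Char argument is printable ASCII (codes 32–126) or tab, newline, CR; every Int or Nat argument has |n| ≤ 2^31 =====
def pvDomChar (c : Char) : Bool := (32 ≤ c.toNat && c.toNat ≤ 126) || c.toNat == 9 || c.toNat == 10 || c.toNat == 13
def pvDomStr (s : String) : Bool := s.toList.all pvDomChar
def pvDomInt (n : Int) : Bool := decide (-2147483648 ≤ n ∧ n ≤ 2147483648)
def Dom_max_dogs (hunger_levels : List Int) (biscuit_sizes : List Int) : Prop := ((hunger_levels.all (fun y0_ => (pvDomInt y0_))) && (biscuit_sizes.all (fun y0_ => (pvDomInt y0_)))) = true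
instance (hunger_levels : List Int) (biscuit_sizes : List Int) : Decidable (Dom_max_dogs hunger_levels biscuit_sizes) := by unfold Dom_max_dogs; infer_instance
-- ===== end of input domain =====

-- B replaces A's greedy biscuit-assignment scan by a binary search over the answer,
-- with the pairing feasibility test "k smallest hungers fit under the k largest biscuits"
-- (objective: alternative algorithm). Both Pythons sort their list arguments in place;
-- the equivalence proved here is about the return value (B performs the same mutation).


-- ===== PORT A =====
-- the inner `while current_biscuit < len(biscuit_sizes) and biscuit_sizes[current_biscuit] < hunger`
def advanceBiscuit (bs : List Int) (hunger : Int) (cb : Nat) : Nat :=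
  if h : cb < bs.length then
    if bs[cb] < hunger then advanceBiscuit bs hunger (cb + 1) else cb
  else cb
termination_by bs.length - cb

-- state: (no_of_dogs, current_biscuit); the Python indices are always ≥ 0, kept as Nat
def max_dogs (hunger_levels : List Int) (biscuit_sizes : List Int) : Int :=
  let hs := PySem.List.sorted hunger_levels (fun x => x) false
  let bs := PySem.List.sorted biscuit_sizes (fun x => x) false
  let st := hs.foldl (fun (s : Int × Nat) hunger =>
      let cb := advanceBiscuit bs hunger s.2
      if cb < bs.length then (s.1 + 1, cb + 1) else (s.1, cb)) (0, 0)
  st.1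

-- ===== PORT B =====
-- `all(hunger_levels[i] <= biscuit_sizes[m - k + i] for i in range(k))`
-- (indices are provably in range at every call the search makes, so getD is exact)
def feasibleDogs (hs bs : List Int) (k : Nat) : Bool :=
  (List.range k).all (fun i => decide (hs.getD i 0 ≤ bs.getD (bs.length - k + i) 0))

-- the `while lo < hi` binary-search loop
def dogSearch (feas : Nat → Bool) (lo hi : Nat) : Nat :=
  if _h : lo < hi then
    let mid := (lo + hi + 1) / 2
    if feas mid then dogSearch feas mid hi else dogSearch feas lo (mid - 1)
  else lo
termination_by hi - lo
decreasing_by all_goals omega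

def max_dogs_alt (hunger_levels : List Int) (biscuit_sizes : List Int) : Int :=
  let hs := PySem.List.sorted hunger_levels (fun x => x) false
  let bs := PySem.List.sorted biscuit_sizes (fun x => x) false
  ((dogSearch (feasibleDogs hs bs) 0 (min hs.length bs.length) : Nat) : Int)

-- ===== PRECONDITION & SPEC =====
def Spec_max_dogs (hunger_levels : List Int) (biscuit_sizes : List Int) (out : Int) : Prop := out = max_dogs_alt hunger_levels biscuit_sizes
instance (hunger_levels : List Int) (biscuit_sizes : List Int) (out : Int) : Decidable (Spec_max_dogs hunger_levels biscuit_sizes out) := by unfold Spec_max_dogs; infer_instance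

-- ===== CLAIM (what is proved, stated in full; the proofs are below) =====
def Claim_equal_max_dogs : Prop := ∀ (hunger_levels : List Int) (biscuit_sizes : List Int), Dom_max_dogs hunger_levels biscuit_sizes → Spec_max_dogs hunger_levels biscuit_sizes (max_dogs hunger_levels biscuit_sizes)

-- ===== LEMMAS AND PROOFS =====

-- the greedy count as a combinatorial core (dogs-major recursion, one-step skips)
def mCore : List Int → List Int → Nat
  | _, [] => 0
  | [], _ => 0
  | h :: hs, b :: bs => if h ≤ b then 1 + mCore hs bs else mCore (h :: hs) (b :: bs).tail
termination_by _ bs => bs.length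

theorem mCore_nil (hs : List Int) : mCore hs [] = 0 := by cases hs <;> simp [mCore]

theorem mCore_nil_left (bs : List Int) : mCore [] bs = 0 := by cases bs <;> simp [mCore]

theorem mCore_cons (h : Int) (hs : List Int) (b : Int) (bs : List Int) :
    mCore (h :: hs) (b :: bs) = if h ≤ b then 1 + mCore hs bs else mCore (h :: hs) bs := by
  simp [mCore]

-- ---- A's fold computes mCore ----

-- the while loop lands exactly past the biscuits smaller than hunger
theorem advance_drop (bs : List Int) (hunger : Int) : ∀ (cb : Nat),
    bs.drop (advanceBiscuit bs hunger cb) = (bs.drop cb).dropWhile (fun b => decide (b < hunger)) := by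
  intro cb
  induction cb using advanceBiscuit.induct bs hunger with
  | case1 cb h hlt ih =>
    rw [advanceBiscuit, dif_pos h, if_pos hlt, ih,
        (List.getElem_cons_drop h).symm, List.dropWhile_cons]
    simp [hlt]
  | case2 cb h hlt =>
    rw [advanceBiscuit, dif_pos h, if_neg hlt, (List.getElem_cons_drop h).symm,
        List.dropWhile_cons]
    simp [hlt, (List.getElem_cons_drop h)]
  | case3 cb h =>
    rw [advanceBiscuit, dif_neg h]
    rw [List.drop_eq_nil_of_le (by omega)]
    simp

-- the while loop never stops on a biscuit smaller than hunger
theorem advance_stop (bs : List Int) (hunger : Int) : ∀ (cb : Nat),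
    (h : advanceBiscuit bs hunger cb < bs.length) → ¬ bs[advanceBiscuit bs hunger cb] < hunger := by
  intro cb
  induction cb using advanceBiscuit.induct bs hunger with
  | case1 cb h hlt ih =>
    rw [show advanceBiscuit bs hunger cb = advanceBiscuit bs hunger (cb + 1) from by
      rw [advanceBiscuit, dif_pos h, if_pos hlt]]
    exact ih
  | case2 cb h hlt =>
    rw [show advanceBiscuit bs hunger cb = cb from by
      rw [advanceBiscuit, dif_pos h, if_neg hlt]]
    exact fun _ => hlt
  | case3 cb h =>
    rw [show advanceBiscuit bs hunger cb = cb from by rw [advanceBiscuit, dif_neg h]]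
    exact fun hc => absurd hc h

-- mCore ignores leading too-small biscuits in one-step form
theorem mCore_dropWhile (h : Int) (hs : List Int) : ∀ (bs : List Int),
    mCore (h :: hs) bs = mCore (h :: hs) (bs.dropWhile (fun b => decide (b < h))) := by
  intro bs
  induction bs with
  | nil => simp
  | cons b bs ih =>
    rw [List.dropWhile_cons]
    by_cases hb : b < h
    · rw [mCore_cons, if_neg (by omega), ih]; simp [hb]
    · simp [hb]

-- A's fold over the dogs from state (count, cb) computes count + mCore on the remaining biscuits
theorem foldA_eq (bs : List Int) : ∀ (hs : List Int) (count : Int) (cb : Nat),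
    (hs.foldl (fun (s : Int × Nat) hunger =>
      let cb := advanceBiscuit bs hunger s.2
      if cb < bs.length then (s.1 + 1, cb + 1) else (s.1, cb)) (count, cb)).1
      = count + mCore hs (bs.drop cb) := by
  intro hs
  induction hs with
  | nil => intro count cb; simp [mCore_nil_left]
  | cons h hs ih =>
    intro count cb
    simp only [List.foldl_cons]
    set cb' := advanceBiscuit bs h cb with hcb'
    have hdw : bs.drop cb' = (bs.drop cb).dropWhile (fun b => decide (b < h)) :=
      advance_drop bs h cb
    by_cases hin : cb' < bs.length
    · have hstop : ¬ bs[cb'] < h := advance_stop bs h cb hin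
      have hcons : bs.drop cb' = bs[cb'] :: bs.drop (cb' + 1) := (List.getElem_cons_drop hin).symm
      rw [if_pos hin, ih, mCore_dropWhile h hs (bs.drop cb), ← hdw, hcons, mCore_cons,
          if_pos (by omega)]
      omega
    · have hnil : bs.drop cb' = [] := List.drop_eq_nil_of_le (by omega)
      rw [if_neg hin, ih, hnil, mCore_nil, mCore_dropWhile h hs (bs.drop cb), ← hdw, hnil,
          mCore_nil]

-- ---- the pairing characterisation of mCore ----

-- the pairing predicate behind feasibleDogs
def PairOK (hs bs : List Int) (k : Nat) : Prop :=
  ∀ i < k, hs.getD i 0 ≤ bs.getD (bs.length - k + i) 0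

theorem feasibleDogs_iff (hs bs : List Int) (k : Nat) :
    feasibleDogs hs bs k = true ↔ PairOK hs bs k := by
  simp [feasibleDogs, PairOK, List.all_eq_true]

theorem mCore_le : ∀ (hs bs : List Int), mCore hs bs ≤ min hs.length bs.length := by
  intro hs bs
  induction hs, bs using mCore.induct with
  | case1 hs => simp [mCore_nil]
  | case2 b bs => simp [mCore_nil_left]
  | case3 h hs b bs hle ih => rw [mCore_cons, if_pos hle]; simp at ih ⊢; omega
  | case4 h hs b bs hle ih => rw [mCore_cons, if_neg hle]; simp at ih ⊢; omega

-- if the pairing of k smallest dogs under k largest biscuits fits, greedy reaches ≥ k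
theorem mCore_ge : ∀ (hs bs : List Int) (k : Nat), k ≤ hs.length → k ≤ bs.length →
    PairOK hs bs k → k ≤ mCore hs bs := by
  intro hs bs
  induction hs, bs using mCore.induct with
  | case1 hs => intro k _ hk _; simpa [mCore_nil] using hk
  | case2 b bs => intro k hk _ _; simpa [mCore_nil_left] using hk
  | case3 h hs b bs hle ih =>
    intro k hkn hkm hP
    rw [mCore_cons, if_pos hle]
    match k with
    | 0 => omega
    | k + 1 =>
      have : k ≤ mCore hs bs := by
        apply ih k (by simpa using hkn) (by simpa using hkm)
        intro i hi
        have := hP (i + 1) (by omega)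
        simp only [List.getD_cons_succ] at this ⊢
        have harith : (b :: bs).length - (k + 1) + (i + 1) = (bs.length - k + i) + 1 := by
          simp at hkm ⊢; omega
        rwa [harith, List.getD_cons_succ] at this
      omega
  | case4 h hs b bs hle ih =>
    intro k hkn hkm hP
    rw [mCore_cons, if_neg hle]
    match k with
    | 0 => omega
    | k + 1 =>
      -- the pairing at i = 0 forces k + 1 ≤ bs.length (else it would pair h with b)
      have hkm' : k + 1 ≤ bs.length := by
        by_contra hc
        have hk1 : k + 1 = bs.length + 1 := by simp at hkm; omega
        have h0 := hP 0 (by omega)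
        rw [hk1] at h0
        simp at h0
        exact hle h0
      apply ih (k + 1) hkn hkm'
      intro i hi
      have := hP i hi
      have harith : (b :: bs).length - (k + 1) + i = (bs.length - (k + 1) + i) + 1 := by
        simp; omega
      rwa [harith, List.getD_cons_succ] at this

-- greedy's own count is always achievable by the pairing (needs bs sorted)
theorem mCore_pairOK : ∀ (hs bs : List Int), bs.Pairwise (· ≤ ·) →
    PairOK hs bs (mCore hs bs) := by
  intro hs bs
  induction hs, bs using mCore.induct with
  | case1 hs => intro _; simp [mCore_nil, PairOK]
  | case2 b bs => intro _; simp [mCore_nil_left, PairOK]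
  | case3 h hs b bs hle ih =>
    intro hsorted
    have hb : ∀ x ∈ bs, b ≤ x := by
      intro x hx; exact (List.pairwise_cons.mp hsorted).1 x hx
    have ih' := ih (List.pairwise_cons.mp hsorted).2
    rw [mCore_cons, if_pos hle]
    intro i hi
    have hg := mCore_le hs bs
    simp only [Nat.le_min] at hg
    match i with
    | 0 =>
      simp only [List.getD_cons_zero]
      have harith : (b :: bs).length - (1 + mCore hs bs) = bs.length - mCore hs bs := by
        simp; omega
      rw [harith]
      rcases Nat.eq_zero_or_pos (bs.length - mCore hs bs) with h0 | hpos
      · rw [h0]; simpa using hle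
      · obtain ⟨j, hj⟩ : ∃ j, bs.length - mCore hs bs = j + 1 := ⟨_, (Nat.succ_pred_eq_of_pos hpos).symm⟩
        rw [hj, List.getD_cons_succ, List.getD_eq_getElem bs 0 (by omega)]
        exact le_trans hle (hb _ (List.getElem_mem _))
    | i + 1 =>
      have := ih' i (by omega)
      simp only [List.getD_cons_succ]
      have harith : (b :: bs).length - (1 + mCore hs bs) + (i + 1)
          = (bs.length - mCore hs bs + i) + 1 := by simp; omega
      rwa [harith, List.getD_cons_succ]
  | case4 h hs b bs hle ih =>
    intro hsorted
    have ih' := ih (List.pairwise_cons.mp hsorted).2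
    rw [mCore_cons, if_neg hle]
    intro i hi
    have hg := mCore_le (h :: hs) bs
    simp only [Nat.le_min] at hg
    have := ih' i hi
    have harith : (b :: bs).length - mCore (h :: hs) bs + i
        = (bs.length - mCore (h :: hs) bs + i) + 1 := by simp; omega
    rwa [harith, List.getD_cons_succ]

-- PairOK is downward monotone in k (needs bs sorted)
theorem pairOK_mono (hs bs : List Int) (hsorted : bs.Pairwise (· ≤ ·)) (k : Nat)
    (hk : k + 1 ≤ bs.length) (hP : PairOK hs bs (k + 1)) : PairOK hs bs k := by
  intro i hi
  have h1 := hP i (by omega)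
  have hmono : bs.getD (bs.length - (k + 1) + i) 0 ≤ bs.getD (bs.length - k + i) 0 := by
    have hlt : bs.length - (k + 1) + i < bs.length - k + i := by omega
    have hb : bs.length - k + i < bs.length := by omega
    rw [List.getD_eq_getElem bs 0 (by omega), List.getD_eq_getElem bs 0 hb]
    exact List.pairwise_iff_getElem.mp hsorted _ _ (by omega) hb hlt
  exact le_trans h1 hmono

theorem pairOK_of_le (hs bs : List Int) (hsorted : bs.Pairwise (· ≤ ·)) :
    ∀ (k j : Nat), j ≤ k → k ≤ bs.length → PairOK hs bs k → PairOK hs bs j := by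
  intro k
  induction k with
  | zero =>
    intro j hj _ hP
    have hj0 : j = 0 := by omega
    rwa [hj0]
  | succ k ih =>
    intro j hj hk hP
    rcases Nat.eq_or_lt_of_le hj with heq | hlt
    · rwa [heq]
    · exact ih j (by omega) (by omega) (pairOK_mono hs bs hsorted k hk hP)

-- binary search finds g when 'feas k ↔ k ≤ g' on the searched interval
theorem dogSearch_eq (feas : Nat → Bool) (g : Nat) : ∀ (lo hi : Nat), lo ≤ g → g ≤ hi →
    (∀ k, lo ≤ k → k ≤ hi → (feas k = true ↔ k ≤ g)) → dogSearch feas lo hi = g := by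
  intro lo hi
  induction lo, hi using dogSearch.induct feas with
  | case1 lo hi h mid hfeas ih =>
    intro hlo hhi hiff
    rw [dogSearch, dif_pos h]
    simp only [show (lo + hi + 1) / 2 = mid from rfl, hfeas, if_true]
    have hmid1 : lo < mid := by omega
    have hmid2 : mid ≤ hi := by omega
    have hmg : mid ≤ g := (hiff mid (by omega) hmid2).mp hfeas
    exact ih hmg hhi (fun k hk1 hk2 => hiff k (by omega) hk2)
  | case2 lo hi h mid hfeas ih =>
    intro hlo hhi hiff
    rw [dogSearch, dif_pos h]
    simp only [show (lo + hi + 1) / 2 = mid from rfl, hfeas]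
    simp only [Bool.false_eq_true, if_false]
    have hmid1 : lo < mid := by omega
    have hmid2 : mid ≤ hi := by omega
    have hgm : g < mid := by
      by_contra hc
      exact absurd ((hiff mid (by omega) hmid2).mpr (by omega)) (by simp [hfeas])
    exact ih hlo (by omega) (fun k hk1 hk2 => hiff k hk1 (by omega))
  | case3 lo hi h =>
    intro hlo hhi _
    rw [dogSearch, dif_neg h]
    omega

-- ===== VERDICT (by name: the statement is the Claim_ definition above) =====
theorem max_dogs_spec : Claim_equal_max_dogs := by
  intro hunger_levels biscuit_sizes _
  unfold Spec_max_dogs max_dogs max_dogs_alt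
  simp only []
  set hs := PySem.List.sorted hunger_levels (fun x => x) false with hhs
  set bs := PySem.List.sorted biscuit_sizes (fun x => x) false with hbs
  have hsorted : bs.Pairwise (· ≤ ·) := by
    simpa [hbs] using
      PySem.List.sorted_pairwise (xs := biscuit_sizes) (key := fun x : Int => x)
  have hA : (hs.foldl (fun (s : Int × Nat) hunger =>
      let cb := advanceBiscuit bs hunger s.2
      if cb < bs.length then (s.1 + 1, cb + 1) else (s.1, cb)) (0, 0)).1
      = (0 : Int) + mCore hs (bs.drop 0) := foldA_eq bs hs 0 0
  have hg := mCore_le hs bs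
  simp only [Nat.le_min] at hg
  have hB : dogSearch (feasibleDogs hs bs) 0 (min hs.length bs.length) = mCore hs bs := by
    apply dogSearch_eq (feasibleDogs hs bs) (mCore hs bs) 0 (min hs.length bs.length)
      (by omega) (by omega)
    intro k _ hk
    rw [feasibleDogs_iff]
    constructor
    · intro hP
      exact mCore_ge hs bs k (by omega) (by omega) hP
    · intro hle
      exact pairOK_of_le hs bs hsorted (mCore hs bs) k hle (by omega)
        (mCore_pairOK hs bs hsorted)
  rw [hA, hB]
  simp
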